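-- pv_equiv track=rewrite | github.com/IanFindlay/advent-of-code | 2015/day_08.py | literal_memory
-- ===== SOURCE A (Python) =====
-- def literal_memory(lines):
--     literal = 0
--     memory = 0
--     for line in lines:
--         # Remove outer "
--         line = line.strip()[1:-1]
--         literal += len(line) + 2
--         line_memory = 0
--
--         i = 0
--         while i < len(line):
--             line_memory += 1
--             # Skip over the escaped characters by the appropriate number
--             if line[i] == '\\':
--                 if line[i + 1] == 'x':
--                     i += 4
--                 else:
--                     i += 2
--             else:
--                 i += 1
--
--         memory += line_memory
--
--     return literal - memory
-- ===== SOURCE B (Python) =====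
-- def literal_memory(lines):
--     # Jump backslash-to-backslash with str.find, accumulating the per-line
--     # (literal - memory) difference directly: each "\x.." escape saves 3
--     # characters, every other "\c" escape saves 1, plus 2 for the quotes.
--     total = 0
--     for line in lines:
--         rest = line.strip()[1:-1]
--         total += 2
--         k = rest.find('\\')
--         while k != -1:
--             if rest[k + 1:k + 2] == 'x':
--                 total += 3
--                 rest = rest[k + 4:]
--             else:
--                 total += 1
--                 rest = rest[k + 2:]
--             k = rest.find('\\')
--     return total
-- ===== Notes on version B (the rewrite author's own statement) =====
-- stated objective: faster
-- what changed: A scans every character with an index-stepping Python while loop and keeps separate literal/memory counters; B jumps from escape to escape with C-level str.find on the remaining suffix and accumulates the per-line (literal - memory) difference directly, adding 3 per \x escape and 1 per other escape.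
-- outside the precondition, e.g. on literal_memory(['"\\x5"']): A returns 4, B returns 5
import Mathlib
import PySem

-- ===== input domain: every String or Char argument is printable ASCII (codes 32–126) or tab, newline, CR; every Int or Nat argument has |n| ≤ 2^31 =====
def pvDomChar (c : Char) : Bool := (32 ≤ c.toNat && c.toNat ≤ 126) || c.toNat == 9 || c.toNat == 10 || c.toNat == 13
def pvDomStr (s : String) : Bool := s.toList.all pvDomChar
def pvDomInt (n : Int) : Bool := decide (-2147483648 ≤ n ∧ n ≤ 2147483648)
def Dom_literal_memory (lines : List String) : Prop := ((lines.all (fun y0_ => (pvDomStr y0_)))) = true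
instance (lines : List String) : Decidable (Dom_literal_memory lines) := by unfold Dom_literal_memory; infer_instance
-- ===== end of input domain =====

-- B replaces A's per-character index loop and separate literal/memory counters by str.find jumps
-- from escape to escape, accumulating the difference directly (objective: faster, measured).
-- ===== PORT A =====

-- line.strip()[1:-1], shared by both ports (both Pythons compute it identically)
def pvInner (line : String) : List Char :=
  PySem.Chars.slice (PySem.Chars.strip line.toList) (some 1) (some (-1))

-- A's inner while loop: number of in-memory characters; none = IndexError on line[i + 1]
def countA : List Char → Option Nat
  | [] => some 0
  | c :: rest =>
    if c = '\\' then
      match rest with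
      | [] => none                                              -- line[i + 1]: IndexError
      | c2 :: r2 =>
        if c2 = 'x' then (countA (r2.drop 2)).map (· + 1)       -- i += 4
        else (countA r2).map (· + 1)                            -- i += 2
    else (countA rest).map (· + 1)                              -- i += 1
termination_by l => l.length
decreasing_by
  all_goals simp only [List.length_drop, List.length_cons]; all_goals omega

def pvStepA (acc : Int × Int) (line : String) : Int × Int :=
  let inner := pvInner line
  (acc.1 + (inner.length : Int) + 2, acc.2 + (((countA inner).getD 0 : Nat) : Int))

def literal_memory (lines : List String) : Int :=
  let r := lines.foldl pvStepA (0, 0)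
  r.1 - r.2

-- ===== PORT B =====

-- B's inner while loop on the remaining suffix `rest`; k = rest.find('\\'); since k ≥ 0 when
-- k ≠ -1, rest[k+1:k+2] = (rest.drop (k+1)).take 1 and rest[k+j:] = rest.drop (k+j)
-- (exact by PySem.List.slice_natCast / slice_from).
def saveB (s : List Char) : Int :=
  if PySem.Chars.find s ['\\'] = -1 then 0
  else if (s.drop ((PySem.Chars.find s ['\\']).toNat + 1)).take 1 = ['x'] then
    3 + saveB (s.drop ((PySem.Chars.find s ['\\']).toNat + 4))
  else
    1 + saveB (s.drop ((PySem.Chars.find s ['\\']).toNat + 2))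
termination_by s.length
decreasing_by
  all_goals
    have hne : ¬ PySem.Chars.find s ['\\'] = -1 := by assumption
    have hinf : ['\\'] <:+: s := (PySem.Chars.find_ne_neg_one_iff s ['\\']).mp hne
    have hlen : 1 ≤ s.length := by simpa using hinf.length_le
    simp only [List.length_drop]; omega

def literal_memory_alt (lines : List String) : Int :=
  lines.foldl (fun total line => total + 2 + saveB (pvInner line)) 0

-- ===== PRECONDITION & SPEC =====
-- Pre_ excludes lines whose inner text makes A's scanner reach a lone trailing backslash
-- (A raises IndexError there) or a truncated '\x' escape with fewer than two characters after
-- the 'x' (malformed string literal: A's count, which pretends the two hex characters exist,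
-- is as arbitrary a choice as B's, so the corner is anybody's).  wfB is the GRAMMAR of complete
-- escape sequences (each backslash starts a full '\x??' or '\c' escape, hex data read blindly,
-- exactly CPython's day-8 literals); it computes neither port's value (A counts tokens, B sums
-- savings) — it only checks the input's shape.
def wfB : List Char → Bool
  | [] => true
  | c :: rest =>
    if c = '\\' then
      match rest with
      | [] => false
      | c2 :: r2 =>
        if c2 = 'x' then
          match r2 with
          | _ :: _ :: r => wfB r
          | _ => false
        else wfB r2
    else wfB rest

def Pre_literal_memory (lines : List String) : Prop :=
  (lines.all (fun l => wfB (pvInner l))) = true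
instance (lines : List String) : Decidable (Pre_literal_memory lines) := by
  unfold Pre_literal_memory; infer_instance

def pvWitness_literal_memory : List String := ["\"ab\"", "\"a\\\\\""]

def Spec_literal_memory (lines : List String) (out : Int) : Prop := out = literal_memory_alt lines
instance (lines : List String) (out : Int) : Decidable (Spec_literal_memory lines out) := by
  unfold Spec_literal_memory; infer_instance

-- ===== CLAIM (what is proved, stated in full; the proofs are below) =====
def Claim_equal_literal_memory : Prop := ∀ (lines : List String), Dom_literal_memory lines → Pre_literal_memory lines → Spec_literal_memory lines (literal_memory lines)

-- ===== LEMMAS AND PROOFS =====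

lemma bs_infix_iff (l : List Char) : ['\\'] <:+: l ↔ '\\' ∈ l := by
  constructor
  · intro h; exact List.singleton_sublist.mp h.sublist
  · intro h; obtain ⟨p, q, rfl⟩ := List.append_of_mem h
    exact ⟨p, q, by simp⟩

lemma find_bs_cons_self (s : List Char) : PySem.Chars.find ('\\' :: s) ['\\'] = 0 := by
  have hinf : ['\\'] <:+: ('\\' :: s) := (bs_infix_iff _).mpr (by simp)
  have hnn : 0 ≤ PySem.Chars.find ('\\' :: s) ['\\'] :=
    (PySem.Chars.find_nonneg_iff _ _).mpr hinf
  have hspec := PySem.Chars.find_spec hnn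
  by_contra hne
  have hpos : 0 < (PySem.Chars.find ('\\' :: s) ['\\']).toNat := by omega
  exact hspec.2 0 hpos (by simp)

lemma find_bs_cons_ne (c : Char) (s : List Char) (hc : c ≠ '\\') :
    PySem.Chars.find (c :: s) ['\\'] =
      if PySem.Chars.find s ['\\'] = -1 then -1 else PySem.Chars.find s ['\\'] + 1 := by
  by_cases hmem : '\\' ∈ s
  · have hf : 0 ≤ PySem.Chars.find s ['\\'] :=
      (PySem.Chars.find_nonneg_iff _ _).mpr ((bs_infix_iff _).mpr hmem)
    have hg : 0 ≤ PySem.Chars.find (c :: s) ['\\'] :=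
      (PySem.Chars.find_nonneg_iff _ _).mpr ((bs_infix_iff _).mpr (by simp [hmem]))
    have hfs := PySem.Chars.find_spec hf
    have hgs := PySem.Chars.find_spec hg
    set f := PySem.Chars.find s ['\\'] with hfdef
    set g := PySem.Chars.find (c :: s) ['\\'] with hgdef
    have hg0 : g.toNat ≠ 0 := by
      intro h0
      have := hgs.1
      rw [h0] at this
      simp only [List.drop_zero] at this
      rcases this with ⟨t, ht⟩
      cases ht
      exact hc rfl
    have hdrop : (c :: s).drop g.toNat = s.drop (g.toNat - 1) := by
      obtain ⟨m, hm⟩ : ∃ m, g.toNat = m + 1 := ⟨g.toNat - 1, by omega⟩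
      simp [hm]
    have h1 : ¬ (g.toNat - 1 < f.toNat) := fun hlt => hfs.2 _ hlt (hdrop ▸ hgs.1)
    have h2 : ¬ (f.toNat + 1 < g.toNat) := by
      intro hlt
      exact hgs.2 (f.toNat + 1) hlt (by simpa using hfs.1)
    have : g.toNat = f.toNat + 1 := by omega
    have hfne : ¬ (f = -1) := by omega
    simp only [hfne, if_false]
    omega
  · have h1 : PySem.Chars.find s ['\\'] = -1 :=
      (PySem.Chars.find_eq_neg_one_iff _ _).mpr (fun h => hmem ((bs_infix_iff _).mp h))
    have h2 : PySem.Chars.find (c :: s) ['\\'] = -1 :=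
      (PySem.Chars.find_eq_neg_one_iff _ _).mpr (fun h => by
        have := (bs_infix_iff _).mp h
        simp at this
        rcases this with h | h
        · exact hc h.symm
        · exact hmem h)
    simp [h1, h2]

lemma saveB_nil : saveB [] = 0 := by
  rw [saveB]
  simp [show PySem.Chars.find ([] : List Char) ['\\'] = -1 from by decide]

lemma saveB_cons_ne (c : Char) (s : List Char) (hc : c ≠ '\\') :
    saveB (c :: s) = saveB s := by
  rw [saveB, find_bs_cons_ne c s hc]
  by_cases h : PySem.Chars.find s ['\\'] = -1
  · conv_rhs => rw [saveB]
    simp [h]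
  · have hf : 0 ≤ PySem.Chars.find s ['\\'] := by
      have := PySem.Chars.neg_one_le_find s ['\\']
      omega
    set f := PySem.Chars.find s ['\\'] with hfdef
    have hne2 : ¬ (f + 1 = -1) := by omega
    have e1 : (f + 1).toNat + 1 = f.toNat + 1 + 1 := by omega
    have e2 : (f + 1).toNat + 4 = (f.toNat + 4) + 1 := by omega
    have e3 : (f + 1).toNat + 2 = (f.toNat + 2) + 1 := by omega
    conv_rhs => rw [saveB]
    simp only [← hfdef, h, hne2, if_false, e1, e2, e3, List.drop_succ_cons]

lemma saveB_cons_bs (s : List Char) :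
    saveB ('\\' :: s) =
      if s.take 1 = ['x'] then 3 + saveB (s.drop 3) else 1 + saveB (s.drop 1) := by
  rw [saveB, find_bs_cons_self]
  norm_num

lemma countA_bs_x (r2 : List Char) : countA ('\\' :: 'x' :: r2) = (countA (r2.drop 2)).map (· + 1) := by
  rw [countA.eq_def]; simp

lemma countA_bs_ne (c2 : Char) (r2 : List Char) (h : c2 ≠ 'x') :
    countA ('\\' :: c2 :: r2) = (countA r2).map (· + 1) := by
  rw [countA.eq_def]; simp [h]

lemma countA_cons_ne (c : Char) (rest : List Char) (h : c ≠ '\\') :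
    countA (c :: rest) = (countA rest).map (· + 1) := by
  rw [countA.eq_def]; simp [h]

-- the heart of the equivalence: on a well-formed inner string, A's token count n and
-- B's saving satisfy n + saveB s = len s
lemma key (s : List Char) (h : wfB s = true) :
    ∃ n : Nat, countA s = some n ∧ (n : Int) + saveB s = s.length := by
  induction s using wfB.induct with
  | case1 =>
    refine ⟨0, by rw [countA.eq_def], ?_⟩
    simp [saveB_nil]
  | case2 => exact absurd h (by decide)
  | case3 a b r ih =>
    have h' : wfB r = true := by
      rwa [show wfB ('\\' :: 'x' :: a :: b :: r) = wfB r from rfl] at h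
    obtain ⟨n, hn, hs⟩ := ih h'
    refine ⟨n + 1, ?_, ?_⟩
    · rw [countA_bs_x]; simp [hn]
    · rw [saveB_cons_bs]
      simp only [List.take_succ_cons, List.take_zero, List.drop_succ_cons,
        List.drop_zero, List.length_cons]
      push_cast at hs ⊢
      omega
  | case4 r2 hshape =>
    rcases r2 with _ | ⟨a, _ | ⟨b, r⟩⟩
    · exact absurd h (by decide)
    · simp [show wfB ('\\' :: 'x' :: [a]) = false from rfl] at h
    · exact absurd rfl (hshape a b r)
  | case5 c2 r2 hc2 ih =>
    have h' : wfB r2 = true := by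
      rw [wfB.eq_def] at h; simpa [hc2] using h
    obtain ⟨n, hn, hs⟩ := ih h'
    refine ⟨n + 1, ?_, ?_⟩
    · rw [countA_bs_ne c2 r2 hc2, hn]; rfl
    · rw [saveB_cons_bs]
      have hx : ¬ ((c2 :: r2).take 1 = ['x']) := by simp [hc2]
      simp only [if_neg hx, List.drop_succ_cons, List.drop_zero, List.length_cons]
      push_cast at hs ⊢
      omega
  | case6 c2 r2 hc ih =>
    have h' : wfB r2 = true := by
      rw [wfB.eq_def] at h; simpa [hc] using h
    obtain ⟨n, hn, hs⟩ := ih h'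
    refine ⟨n + 1, ?_, ?_⟩
    · rw [countA_cons_ne c2 r2 hc, hn]; rfl
    · rw [saveB_cons_ne c2 r2 hc]
      simp only [List.length_cons]
      push_cast at hs ⊢
      omega

lemma fold_eq (lines : List String) :
    ∀ (p : Int × Int) (t : Int), (∀ l ∈ lines, wfB (pvInner l) = true) →
      (lines.foldl pvStepA p).1 - (lines.foldl pvStepA p).2
        = (p.1 - p.2) +
          (lines.foldl (fun total line => total + 2 + saveB (pvInner line)) t - t) := by
  induction lines with
  | nil => intro p t _; simp
  | cons l ls ih =>
    intro p t h
    have hl := h l (by simp)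
    have hls : ∀ l' ∈ ls, wfB (pvInner l') = true := fun l' hm => h l' (by simp [hm])
    obtain ⟨n, hn, hs⟩ := key (pvInner l) hl
    simp only [List.foldl_cons]
    rw [ih (pvStepA p l) (t + 2 + saveB (pvInner l)) hls]
    simp only [pvStepA, hn, Option.getD_some]
    omega

-- ===== VERDICT (by name: the statement is the Claim_ definition above) =====
theorem literal_memory_spec : Claim_equal_literal_memory := by
  intro lines _ hpre
  have h : ∀ l ∈ lines, wfB (pvInner l) = true := by
    simpa [Pre_literal_memory, List.all_eq_true] using hpre
  unfold Spec_literal_memory literal_memory literal_memory_alt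
  show (lines.foldl pvStepA (0, 0)).1 - (lines.foldl pvStepA (0, 0)).2 = _
  have := fold_eq lines (0, 0) 0 h
  omega
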